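-- pv_equiv track=rewrite | github.com/ASKabalan/tfbft | prototypes/04_Protocolors.py | find_first_and_second_occurrences
-- ===== SOURCE A (Python) =====
-- def find_first_and_second_occurrences(lst):
--     # Dictionary to keep track of counts and positions
--     positions = {}
--     first_positions = []  # List to store positions of first occurrences
--     second_positions = []  # List to store positions of second occurrences
--
--     for i, value in enumerate(lst):
--         # Increment count for each value
--         if value in positions:
--             positions[value]['count'] += 1
--         else:
--             positions[value] = {'count': 1}
--             first_positions.append(i)  # Record first occurrence position
--
--         # When the second occurrence is found, record its position
--         if positions[value]['count'] == 2:
--             second_positions.append(i)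
--
--
--     return first_positions, second_positions
-- ===== SOURCE B (Python) =====
-- def find_first_and_second_occurrences(lst):
--     # Build a complete position index in one pass, then read both answers off it.
--     index = {}
--     for i, value in enumerate(lst):
--         index.setdefault(value, []).append(i)
--     first_positions = [p[0] for p in index.values()]
--     second_positions = sorted(p[1] for p in index.values() if len(p) >= 2)
--     return first_positions, second_positions
-- ===== Notes on version B (the rewrite author's own statement) =====
-- stated objective: simpler
-- what changed: B replaces A's interleaved count-dict with three append-lists logic by a single grouping pass that records every position of each value in a dict of lists, then reads first positions off the group heads and sorts the group second elements.
import Mathlib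
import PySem

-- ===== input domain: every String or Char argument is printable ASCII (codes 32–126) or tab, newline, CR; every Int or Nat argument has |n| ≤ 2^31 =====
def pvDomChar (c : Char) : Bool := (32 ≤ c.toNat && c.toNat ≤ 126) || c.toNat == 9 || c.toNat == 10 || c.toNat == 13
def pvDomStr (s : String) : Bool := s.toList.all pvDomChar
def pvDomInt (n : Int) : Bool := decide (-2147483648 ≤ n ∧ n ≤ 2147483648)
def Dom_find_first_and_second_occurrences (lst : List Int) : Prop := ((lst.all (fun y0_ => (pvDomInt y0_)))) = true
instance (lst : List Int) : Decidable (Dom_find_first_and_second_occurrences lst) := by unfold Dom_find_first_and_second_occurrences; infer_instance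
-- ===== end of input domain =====

-- B builds one value→positions index and reads both answers off it (different decomposition, same cost; not claimed faster).

-- ===== PORT A =====
-- A stores {'count': n} per value; only the 'count' field is ever read or written, ported as an Int value.
def stepA (st : PySem.Dict Int Int × List Int × List Int) (iv : Int × Int) :
    PySem.Dict Int Int × List Int × List Int :=
  let positions := st.1
  let firsts := st.2.1
  let seconds := st.2.2
  let i := iv.1
  let value := iv.2
  -- if value in positions: positions[value]['count'] += 1 else: positions[value] = {'count': 1}; first_positions.append(i)
  let pf : PySem.Dict Int Int × List Int :=
    if positions.contains value then (positions.modify value 0 (· + 1), firsts)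
    else (positions.insert value 1, firsts ++ [i])
  -- if positions[value]['count'] == 2: second_positions.append(i)
  let seconds' := if pf.1.getD value 0 = 2 then seconds ++ [i] else seconds
  (pf.1, pf.2, seconds')

def find_first_and_second_occurrences (lst : List Int) : List Int × List Int :=
  let st := (PySem.List.enumerate lst 0).foldl stepA (PySem.Dict.empty, [], [])
  (st.2.1, st.2.2)

-- ===== PORT B =====
-- index.setdefault(value, []).append(i)
def stepB (d : PySem.Dict Int (List Int)) (iv : Int × Int) : PySem.Dict Int (List Int) :=
  d.modify iv.2 [] (· ++ [iv.1])

def find_first_and_second_occurrences_alt (lst : List Int) : List Int × List Int :=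
  let index := (PySem.List.enumerate lst 0).foldl stepB PySem.Dict.empty
  -- p[0]/p[1] are in range wherever evaluated (groups are nonempty; the comprehension filter keeps length ≥ 2)
  let firsts := index.values.map (fun p => PySem.List.pyGetD p 0 0)
  let seconds := PySem.List.sorted
    ((index.values.filter (fun p => decide (2 ≤ p.length))).map (fun p => PySem.List.pyGetD p 1 0))
    (fun x => x)
  (firsts, seconds)

-- ===== PRECONDITION & SPEC =====
def Spec_find_first_and_second_occurrences (lst : List Int) (out : List Int × List Int) : Prop := out = find_first_and_second_occurrences_alt lst
instance (lst : List Int) (out : List Int × List Int) : Decidable (Spec_find_first_and_second_occurrences lst out) := by unfold Spec_find_first_and_second_occurrences; infer_instance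

-- ===== CLAIM (what is proved, stated in full; the proofs are below) =====
def Claim_equal_find_first_and_second_occurrences : Prop := ∀ (lst : List Int), Dom_find_first_and_second_occurrences lst → Spec_find_first_and_second_occurrences lst (find_first_and_second_occurrences lst)

-- ===== LEMMAS AND PROOFS =====

-- the second elements of the groups of length ≥ 2 (B's pre-sort list)
def secOf (vals : List (List Int)) : List Int :=
  (vals.filter (fun p => decide (2 ≤ p.length))).map (fun p => PySem.List.pyGetD p 1 0)

lemma secOf_append (xs ys : List (List Int)) : secOf (xs ++ ys) = secOf xs ++ secOf ys := by
  simp [secOf]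

lemma pyGetD_append_zero (p : List Int) (x : Int) (h : p ≠ []) :
    PySem.List.pyGetD (p ++ [x]) 0 0 = PySem.List.pyGetD p 0 0 := by
  rw [PySem.List.pyGetD_of_nonneg _ _ (by norm_num), PySem.List.pyGetD_of_nonneg _ _ (by norm_num)]
  cases p with
  | nil => simp at h
  | cons a t => simp

lemma pyGetD_append_one_of_two_le (p : List Int) (x : Int) (h : 2 ≤ p.length) :
    PySem.List.pyGetD (p ++ [x]) 1 0 = PySem.List.pyGetD p 1 0 := by
  rw [PySem.List.pyGetD_of_nonneg _ _ (by norm_num), PySem.List.pyGetD_of_nonneg _ _ (by norm_num)]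
  match p, h with
  | a :: b :: t, _ => simp

lemma pyGetD_append_one_of_len_one (p : List Int) (x : Int) (h : p.length = 1) :
    PySem.List.pyGetD (p ++ [x]) 1 0 = x := by
  rw [PySem.List.pyGetD_of_nonneg _ _ (by norm_num)]
  match p, h with
  | [a], _ => simp

lemma pyGetD_one_mem (p : List Int) (h : 2 ≤ p.length) : PySem.List.pyGetD p 1 0 ∈ p := by
  rw [PySem.List.pyGetD_of_nonneg _ _ (by norm_num)]
  match p, h with
  | a :: b :: t, _ => simp

lemma secOf_mem (vals : List (List Int)) (x : Int) (hx : x ∈ secOf vals) :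
    ∃ p ∈ vals, x ∈ p := by
  unfold secOf at hx
  simp only [List.mem_map, List.mem_filter] at hx
  obtain ⟨p, ⟨hp, h2⟩, rfl⟩ := hx
  exact ⟨p, hp, pyGetD_one_mem p (by simpa using h2)⟩

lemma modify_eq_insert (d : PySem.Dict Int (List Int)) (v : Int) (f : List Int → List Int) :
    d.modify v [] f = d.insert v (f (d.getD v [])) := rfl

-- the joint loop invariant: A's fold state is determined by B's index dict
lemma main_invariant (l : List Int) : ∀ (s : Int) (dA : PySem.Dict Int Int)
    (dB : PySem.Dict Int (List Int)) (firsts seconds : List Int),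
    (∀ v, dA.getD v 0 = ((dB.getD v []).length : Int)) →
    (∀ v, dA.contains v = dB.contains v) →
    dB.keys.Nodup →
    (∀ p ∈ dB.values, p ≠ []) →
    (∀ p ∈ dB.values, ∀ x ∈ p, x < s) →
    firsts = dB.values.map (fun p => PySem.List.pyGetD p 0 0) →
    seconds.Perm (secOf dB.values) →
    seconds.Pairwise (· < ·) →
    (((PySem.List.enumerate l s).foldl stepA (dA, firsts, seconds)).2.1 =
      ((PySem.List.enumerate l s).foldl stepB dB).values.map (fun p => PySem.List.pyGetD p 0 0)) ∧
    ((PySem.List.enumerate l s).foldl stepA (dA, firsts, seconds)).2.2.Perm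
      (secOf ((PySem.List.enumerate l s).foldl stepB dB).values) ∧
    ((PySem.List.enumerate l s).foldl stepA (dA, firsts, seconds)).2.2.Pairwise (· < ·) := by
  induction l with
  | nil =>
    intro s dA dB firsts seconds h1 h2 h3 h4 h5 h6 h7 h8
    simpa [PySem.List.enumerate] using ⟨h6, h7, h8⟩
  | cons v tl ih =>
    intro s dA dB firsts seconds h1 h2 h3 h4 h5 h6 h7 h8
    rw [PySem.List.enumerate_cons, List.foldl_cons, List.foldl_cons]
    have hB : stepB dB (s, v) = dB.insert v (dB.getD v [] ++ [s]) := modify_eq_insert dB v _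
    by_cases hc : dB.contains v = true
    · -- value already seen: A bumps the count, B appends the position
      obtain ⟨w, hw⟩ : ∃ w, dB.get? v = some w := by
        have := PySem.Dict.contains_eq_isSome_get? dB v
        rw [hc] at this
        exact Option.isSome_iff_exists.mp this.symm
      have hgd : dB.getD v [] = w := by
        rw [PySem.Dict.getD_eq_get?_getD, hw]; rfl
      have hmem : (v, w) ∈ dB.items := PySem.Dict.mem_items_of_get?_eq_some dB hw
      obtain ⟨l1, l2, hsplit⟩ := List.append_of_mem hmem
      have hk : (l1.map Prod.fst ++ v :: l2.map Prod.fst).Nodup := by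
        have h3' := h3
        simp only [PySem.Dict.keys] at h3'
        rw [hsplit] at h3'
        simpa using h3'
      have hnotmem : v ∉ l1.map Prod.fst ∧ v ∉ l2.map Prod.fst := by
        have hk' := hk
        rw [List.nodup_middle] at hk'
        have hv := (List.nodup_cons.mp hk').1
        simp only [List.mem_append] at hv
        tauto
      have hv1 : ∀ p ∈ l1, p.1 ≠ v := by
        intro p hp heq
        have hm : p.1 ∈ l1.map Prod.fst := List.mem_map_of_mem hp
        rw [heq] at hm
        exact hnotmem.1 hm
      have hv2 : ∀ p ∈ l2, p.1 ≠ v := by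
        intro p hp heq
        have hm : p.1 ∈ l2.map Prod.fst := List.mem_map_of_mem hp
        rw [heq] at hm
        exact hnotmem.2 hm
      have hwmem : w ∈ dB.values := by
        simp only [PySem.Dict.values]; rw [hsplit]; simp
      have hplne : w ≠ [] := h4 w hwmem
      have hitems' : (dB.insert v (w ++ [s])).items = l1 ++ (v, w ++ [s]) :: l2 := by
        rw [PySem.Dict.items_insert_of_contains dB _ hc, hsplit]
        simp only [List.map_append, List.map_cons, beq_self_eq_true, if_true]
        congr 1
        · exact (List.map_congr_left fun p hp => by
            simp [hv1 p hp]).trans (List.map_id l1)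
        · congr 1
          exact (List.map_congr_left fun p hp => by
            simp [hv2 p hp]).trans (List.map_id l2)
      have hvalsB : dB.values = l1.map Prod.snd ++ w :: l2.map Prod.snd := by
        simp only [PySem.Dict.values]; rw [hsplit]; simp
      have hvalsB' : (dB.insert v (w ++ [s])).values
          = l1.map Prod.snd ++ (w ++ [s]) :: l2.map Prod.snd := by
        simp only [PySem.Dict.values]; rw [hitems']; simp
      have hcnt : (dA.modify v 0 (· + 1)).getD v 0 = (w.length : Int) + 1 := by
        rw [PySem.Dict.getD_modify]
        simp [h1 v, hgd]
      have hA : stepA (dA, firsts, seconds) (s, v) =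
          (dA.modify v 0 (· + 1), firsts,
            if w.length = 1 then seconds ++ [s] else seconds) := by
        simp only [stepA, h2 v, hc, if_true]
        refine congrArg (Prod.mk _) (congrArg (Prod.mk _) ?_)
        rw [hcnt]
        by_cases hl : w.length = 1
        · simp [hl]
        · have hne2 : ¬ ((w.length : Int) + 1 = 2) := by omega
          simp [hl, hne2]
      have hB2 : stepB dB (s, v) = dB.insert v (w ++ [s]) := by rw [hB, hgd]
      rw [hA, hB2]
      have hsecmem : ∀ a ∈ seconds, a < s := by
        intro a ha
        obtain ⟨p, hp, hap⟩ := secOf_mem _ a (h7.mem_iff.mp ha)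
        exact h5 p hp a hap
      refine ih (s + 1) (dA.modify v 0 (· + 1)) (dB.insert v (w ++ [s])) firsts
        (if w.length = 1 then seconds ++ [s] else seconds) ?_ ?_ ?_ ?_ ?_ ?_ ?_ ?_
      · intro u
        rw [PySem.Dict.getD_modify, PySem.Dict.getD_insert]
        by_cases hu : u = v
        · subst hu
          rw [if_pos rfl, if_pos rfl, h1 u, hgd]
          simp only [List.length_append, List.length_cons, List.length_nil]
          push_cast
          omega
        · rw [if_neg hu, if_neg hu, h1 u]
      · intro u
        rw [PySem.Dict.contains_modify, PySem.Dict.contains_insert, h2 u]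
      · rw [PySem.Dict.keys_insert_of_contains dB _ hc]; exact h3
      · intro p hp
        rcases PySem.Dict.mem_values_insert dB v (w ++ [s]) p hp with rfl | hold
        · simp
        · exact h4 p hold
      · intro p hp x hx
        rcases PySem.Dict.mem_values_insert dB v (w ++ [s]) p hp with rfl | hold
        · rcases List.mem_append.mp hx with hx | hx
          · have := h5 w hwmem x hx; omega
          · simp at hx; omega
        · have := h5 p hold x hx; omega
      · rw [hvalsB', h6, hvalsB]
        simp only [List.map_append, List.map_cons]
        rw [pyGetD_append_zero w s hplne]
      · rw [hvalsB']
        rw [hvalsB] at h7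
        by_cases hl : w.length = 1
        · simp only [hl, if_true]
          have hsec' : secOf (l1.map Prod.snd ++ (w ++ [s]) :: l2.map Prod.snd)
              = secOf (l1.map Prod.snd) ++ s :: secOf (l2.map Prod.snd) := by
            rw [secOf_append]
            congr 1
            have hlen : 2 ≤ (w ++ [s]).length := by simp [hl]
            simp only [secOf, List.filter_cons, hlen, decide_true, if_true, List.map_cons]
            rw [pyGetD_append_one_of_len_one w s hl]
          have hsec : secOf (l1.map Prod.snd ++ w :: l2.map Prod.snd)
              = secOf (l1.map Prod.snd) ++ secOf (l2.map Prod.snd) := by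
            rw [secOf_append]
            congr 1
            simp [secOf, hl]
          rw [hsec']
          rw [hsec] at h7
          refine (h7.append_right [s]).trans ?_
          rw [List.append_assoc]
          exact (List.perm_append_singleton s _).append_left _
        · have hl2 : 2 ≤ w.length := by
            have := List.length_pos_of_ne_nil hplne
            omega
          simp only [hl, if_false]
          have heq : secOf (l1.map Prod.snd ++ (w ++ [s]) :: l2.map Prod.snd)
              = secOf (l1.map Prod.snd ++ w :: l2.map Prod.snd) := by
            rw [secOf_append, secOf_append]
            congr 1
            have hlen : 2 ≤ (w ++ [s]).length := by simp; omega
            simp only [secOf, List.filter_cons, hlen, hl2, decide_true, if_true, List.map_cons]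
            rw [pyGetD_append_one_of_two_le w s hl2]
          rw [heq]; exact h7
      · by_cases hl : w.length = 1
        · simp only [hl, if_true]
          rw [List.pairwise_append]
          exact ⟨h8, by simp, fun a ha b hb => by
            simp at hb; subst hb; exact hsecmem a ha⟩
        · simp only [hl, if_false]; exact h8
    · -- first occurrence of value: A inserts count 1 and records i, B starts the group
      have hc' : dB.contains v = false := by simpa using hc
      have hA : stepA (dA, firsts, seconds) (s, v) =
          (dA.insert v 1, firsts ++ [s], seconds) := by
        simp only [stepA, h2 v, hc', Bool.false_eq_true, if_false]
        simp [PySem.Dict.getD_insert_self]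
      have hB' : stepB dB (s, v) = dB.insert v [s] := by
        rw [hB, PySem.Dict.getD_of_not_contains dB [] hc']
        simp
      rw [hA, hB']
      have hvals' : (dB.insert v [s]).values = dB.values ++ [[s]] := by
        simp only [PySem.Dict.values]
        rw [PySem.Dict.items_insert_of_not_contains dB _ hc']
        simp
      refine ih (s + 1) (dA.insert v 1) (dB.insert v [s]) (firsts ++ [s]) seconds
        ?_ ?_ ?_ ?_ ?_ ?_ ?_ ?_
      · intro u
        rw [PySem.Dict.getD_insert, PySem.Dict.getD_insert]
        by_cases hu : u = v
        · simp [hu]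
        · simp [hu, h1 u]
      · intro u
        rw [PySem.Dict.contains_insert, PySem.Dict.contains_insert, h2 u]
      · rw [PySem.Dict.keys_insert_of_not_contains dB _ hc']
        have hvnot : v ∉ dB.keys := by
          have := PySem.Dict.contains_eq_decide_mem_keys dB v
          rw [hc'] at this
          simpa using this.symm
        simp [List.nodup_append, h3]
        exact fun a ha hav => hvnot (hav ▸ ha)
      · intro p hp
        rw [hvals'] at hp
        rcases List.mem_append.mp hp with hold | hnew
        · exact h4 p hold
        · simp at hnew; subst hnew; simp
      · intro p hp x hx
        rw [hvals'] at hp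
        rcases List.mem_append.mp hp with hold | hnew
        · have := h5 p hold x hx; omega
        · simp at hnew; subst hnew; simp at hx; omega
      · rw [hvals', List.map_append, ← h6]
        simp [PySem.List.pyGetD, PySem.List.pyGet?, PySem.List.pyIdx?]
      · rw [hvals', secOf_append]
        have hnil : secOf [[s]] = [] := by simp [secOf]
        rw [hnil, List.append_nil]
        exact h7
      · exact h8

-- ===== VERDICT (by name: the statement is the Claim_ definition above) =====
theorem find_first_and_second_occurrences_spec : Claim_equal_find_first_and_second_occurrences := by
  intro lst _
  unfold Spec_find_first_and_second_occurrences
  have h := main_invariant lst 0 PySem.Dict.empty PySem.Dict.empty [] []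
    (fun v => by simp [pysem]) (fun v => by simp [pysem])
    (by simp [pysem])
    (fun p hp => by simp [PySem.Dict.values, PySem.Dict.empty] at hp)
    (fun p hp => by simp [PySem.Dict.values, PySem.Dict.empty] at hp)
    (by simp [PySem.Dict.values, PySem.Dict.empty])
    (by simp [secOf, PySem.Dict.values, PySem.Dict.empty])
    List.Pairwise.nil
  simp only [find_first_and_second_occurrences, find_first_and_second_occurrences_alt]
  refine Prod.ext h.1 ?_
  exact (PySem.List.sorted_eq_of_perm_of_pairwise_lt _ _ _ h.2.1 h.2.2).symm
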